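-- pv_equiv track=rewrite | github.com/cms-sw/cmssw | Alignment/APEEstimation/test/batch/startSkim.py | replaceAllRanges
-- ===== SOURCE A (Python) =====
-- def replaceAllRanges(string):
--     if "[" in string and "]" in string:
--         strings = []
--         posS = string.find("[")
--         posE = string.find("]")
--         nums = string[posS+1:posE].split(",")
--         expression = string[posS:posE+1]
--
--         nums = string[string.find("[")+1:string.find("]")]
--         for interval in nums.split(","):
--             interval = interval.strip()
--             if "-" in interval:
--                 lowNum = int(interval.split("-")[0])
--                 upNum = int(interval.split("-")[1])
--                 for i in range(lowNum, upNum+1):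
--                     newstring = string[0:posS]+str(i)+string[posE+1:]
--                     newstring = replaceAllRanges(newstring)
--                     strings += newstring
--             else:
--                 newstring = string[0:posS]+interval+string[posE+1:]
--                 newstring = replaceAllRanges(newstring)
--                 strings += newstring
--         return strings
--     else:
--         return [string,]
-- ===== SOURCE B (Python) =====
-- def replaceAllRanges(string):
--     # One left-to-right parse into (prefix, options) segments plus a trailing
--     # rest, then building the result list back-to-front by a product fold.
--     segments = []
--     rest = string
--     while "[" in rest and "]" in rest:
--         posS = rest.find("[")
--         posE = rest.find("]")
--         opts = []
--         for part in rest[posS + 1:posE].split(","):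
--             part = part.strip()
--             if "-" in part:
--                 low = int(part.split("-")[0])
--                 up = int(part.split("-")[1])
--                 for v in range(low, up + 1):
--                     opts.append(str(v))
--             else:
--                 opts.append(part)
--         segments.append((rest[:posS], opts))
--         rest = rest[posE + 1:]
--     results = [rest]
--     for prefix, opts in reversed(segments):
--         results = [prefix + o + r for o in opts for r in results]
--     return results
-- ===== Notes on version B (the rewrite author's own statement) =====
-- stated objective: alternative
-- what changed: B replaces A's branching recursion (which re-scans and re-expands every partially substituted string) by a single left-to-right parse of the string into (literal prefix, option list) segments followed by one back-to-front product fold that builds the result list. Pre_ excludes inputs on which A raises ValueError or recurses forever (first ']' before first '[' , or an unparsable 'a-b' piece), and the defensible corner where a bracket's content itself contains '[' (A then re-scans the substituted text and expands nested text; B treats the content as literal).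
-- outside the precondition, e.g. on replaceAllRanges('[a[b,c]d]'): A returns ['abd', 'cd]'], B returns ['a[bd]', 'cd]']
import Mathlib
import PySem

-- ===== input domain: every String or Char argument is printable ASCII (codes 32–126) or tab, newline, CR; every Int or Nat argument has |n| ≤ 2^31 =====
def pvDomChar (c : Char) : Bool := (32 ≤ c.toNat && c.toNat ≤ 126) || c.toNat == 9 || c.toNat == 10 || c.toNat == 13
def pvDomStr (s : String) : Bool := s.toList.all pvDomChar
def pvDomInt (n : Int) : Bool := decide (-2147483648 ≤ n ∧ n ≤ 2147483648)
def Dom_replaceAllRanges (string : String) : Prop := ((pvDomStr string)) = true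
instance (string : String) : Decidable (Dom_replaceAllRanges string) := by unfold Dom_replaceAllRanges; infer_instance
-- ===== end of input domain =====

-- B parses the string once into (prefix, options) segments and builds the result by one
-- back-to-front product fold, instead of A's recursion that re-scans every substituted string.

-- ===== PORT A =====
-- Python A recurses on freshly substituted strings; that recursion is not structural, so the
-- port carries fuel.  One ']' is consumed per recursion level on every input Pre_ admits, so
-- fuel = count ']' + 1 bounds the depth and the fuel-exhausted branch is unreachable there.
def pyA (fuel : Nat) (string : List Char) : List (List Char) :=
  match fuel with
  | 0 => []
  | fuel + 1 =>
    if PySem.Chars.isIn ['['] string && PySem.Chars.isIn [']'] string then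
      -- python binds posS/posE once; the first `nums`/`expression` bindings are dead code
      (PySem.Chars.splitOn (PySem.Chars.slice string (some (PySem.Chars.find string ['['] + 1))
          (some (PySem.Chars.find string [']']))) [',']).foldl (fun strings interval =>
        if PySem.Chars.isIn ['-'] (PySem.Chars.strip interval) then
          -- int(...): ValueError (= none) is excluded by Pre_; parts 0 and 1 exist here
          (PySem.List.pyRange
              ((PySem.Int.ofChars? ((PySem.List.pyGet? (PySem.Chars.splitOn (PySem.Chars.strip interval) ['-']) 0).getD [])).getD 0)
              ((PySem.Int.ofChars? ((PySem.List.pyGet? (PySem.Chars.splitOn (PySem.Chars.strip interval) ['-']) 1).getD [])).getD 0 + 1)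
              1).foldl (fun strings i =>
            strings ++ pyA fuel (PySem.Chars.slice string (some 0) (some (PySem.Chars.find string ['['])) ++
              PySem.Int.toChars i ++
              PySem.Chars.slice string (some (PySem.Chars.find string [']'] + 1)) none)) strings
        else
          strings ++ pyA fuel (PySem.Chars.slice string (some 0) (some (PySem.Chars.find string ['['])) ++
            PySem.Chars.strip interval ++
            PySem.Chars.slice string (some (PySem.Chars.find string [']'] + 1)) none)) []
    else [string]

def replaceAllRanges (string : String) : List String :=
  (pyA (string.toList.count ']' + 1) string.toList).map String.ofList

-- ===== PORT B =====
-- termination helper for B's parse loop and for Pre_ (cited by `decreasing_by`)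
theorem pvSliceAfterFindLt (s : List Char) (h : PySem.Chars.isIn [']'] s = true) :
    (PySem.Chars.slice s (some (PySem.Chars.find s [']'] + 1)) none).length < s.length := by
  have hinf : [']'] <:+: s := (PySem.Chars.isIn_iff_infix _ _).mp h
  have h0 : 0 ≤ PySem.Chars.find s [']'] := (PySem.Chars.find_nonneg_iff _ _).mpr hinf
  have hne : 1 ≤ s.length := by have := hinf.length_le; simpa using this
  rw [PySem.Chars.slice_eq_listSlice, PySem.List.slice_from s (by omega)]
  simp only [List.length_drop]
  omega

-- the `while` loop of B: one (prefix, options) segment per bracket pair, plus the final rest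
def parseB (rest : List Char) : List (List Char × List (List Char)) × List Char :=
  if h : PySem.Chars.isIn ['['] rest && PySem.Chars.isIn [']'] rest then
    let posS := PySem.Chars.find rest ['[']
    let posE := PySem.Chars.find rest [']']
    let opts := (PySem.Chars.splitOn (PySem.Chars.slice rest (some (posS + 1)) (some posE)) [',']).foldl
      (fun opts part =>
        if PySem.Chars.isIn ['-'] (PySem.Chars.strip part) then
          -- int(...): ValueError (= none) is excluded by Pre_
          (PySem.List.pyRange
              ((PySem.Int.ofChars? ((PySem.List.pyGet? (PySem.Chars.splitOn (PySem.Chars.strip part) ['-']) 0).getD [])).getD 0)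
              ((PySem.Int.ofChars? ((PySem.List.pyGet? (PySem.Chars.splitOn (PySem.Chars.strip part) ['-']) 1).getD [])).getD 0 + 1)
              1).foldl (fun opts v => opts ++ [PySem.Int.toChars v]) opts
        else opts ++ [PySem.Chars.strip part]) []
    let next := parseB (PySem.Chars.slice rest (some (posE + 1)) none)
    ((PySem.Chars.slice rest none (some posS), opts) :: next.1, next.2)
  else ([], rest)
termination_by rest.length
decreasing_by
  exact pvSliceAfterFindLt rest (by simp only [Bool.and_eq_true] at h; exact h.2)

def replaceAllRanges_alt (string : String) : List String :=
  let parsed := parseB string.toList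
  ((parsed.1.reverse).foldl
    (fun results seg => seg.2.flatMap (fun o => results.map (fun r => seg.1 ++ o ++ r)))
    [parsed.2]).map String.ofList

-- ===== PRECONDITION & SPEC =====
-- Pre_ excludes inputs on which A raises ValueError or recurses forever (first ']' before first
-- '[' , or a '-'-piece int() cannot parse), and the defensible corner where a bracket's content
-- itself contains '[' (A then re-scans the substituted text and expands nested text; B treats
-- bracket content as literal).
-- each comma piece of a bracket's content that contains '-' must parse as two ints
def pvPiecesOk (b : List Char) : Bool :=
  (PySem.Chars.splitOn b [',']).all (fun part =>
    !PySem.Chars.isIn ['-'] (PySem.Chars.strip part) ||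
      ((PySem.Int.ofChars? ((PySem.List.pyGet? (PySem.Chars.splitOn (PySem.Chars.strip part) ['-']) 0).getD [])).isSome &&
       (PySem.Int.ofChars? ((PySem.List.pyGet? (PySem.Chars.splitOn (PySem.Chars.strip part) ['-']) 1).getD [])).isSome))

-- grammar over the '['-split segments: u0 is the text since the last consumed ']'; every
-- opened bracket must close inside its own segment (so no ']' may precede it in u0 and none
-- may follow inside the segment's remainder unless no '[' is left), its content pieces must
-- parse, and a leftover with no further ']' is always fine
def pvWfChain (u0 : List Char) (us : List (List Char)) : Bool :=
  match us with
  | [] => true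
  | u1 :: rest =>
    if decide (']' ∉ u0) && decide (']' ∈ u1) then
      pvPiecesOk (u1.takeWhile (fun x => decide (x ≠ ']'))) &&
      pvWfChain ((u1.dropWhile (fun x => decide (x ≠ ']'))).tail) rest
    else (u0 :: u1 :: rest).all (fun v => v.all (fun x => decide (x ≠ ']')))

def pvWf (s : List Char) : Bool :=
  match PySem.Chars.splitOn s ['['] with
  | [] => true
  | u0 :: us => pvWfChain u0 us

def Pre_replaceAllRanges (string : String) : Prop := pvWf string.toList = true
instance (string : String) : Decidable (Pre_replaceAllRanges string) := by
  unfold Pre_replaceAllRanges; infer_instance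

def pvWitness_replaceAllRanges : String := "a[1-3]b[x, y]"

def Spec_replaceAllRanges (string : String) (out : List String) : Prop := out = replaceAllRanges_alt string
instance (string : String) (out : List String) : Decidable (Spec_replaceAllRanges string out) := by
  unfold Spec_replaceAllRanges; infer_instance

-- ===== CLAIM (what is proved, stated in full; the proofs are below) =====
def Claim_equal_replaceAllRanges : Prop := ∀ (string : String), Dom_replaceAllRanges string →
  Pre_replaceAllRanges string → Spec_replaceAllRanges string (replaceAllRanges string)

-- ===== LEMMAS AND PROOFS =====

-- B's product fold on the char level, for the proofs
def pvExpand (s : List Char) : List (List Char) :=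
  ((parseB s).1.reverse).foldl
    (fun results seg => seg.2.flatMap (fun o => results.map (fun r => seg.1 ++ o ++ r)))
    [(parseB s).2]

theorem pvIsInSingleton (c : Char) (u : List Char) : PySem.Chars.isIn [c] u = true ↔ c ∈ u := by
  rw [PySem.Chars.isIn_iff_infix]
  constructor
  · intro h; exact (List.singleton_sublist).mp h.sublist
  · intro h
    obtain ⟨l1, l2, rfl⟩ := List.append_of_mem h
    exact ⟨l1, l2, by simp⟩

theorem pvIsInAppend (c : Char) (t s : List Char) (h : c ∉ t) :
    PySem.Chars.isIn [c] (t ++ s) = PySem.Chars.isIn [c] s := by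
  rw [Bool.eq_iff_iff, pvIsInSingleton, pvIsInSingleton, List.mem_append]
  simp [h]

theorem pvPrefixSingleton (c : Char) (v : List Char) : [c] <+: v ↔ v.head? = some c := by
  constructor
  · rintro ⟨t, rfl⟩; rfl
  · cases v with
    | nil => intro h; simp at h
    | cons x xs =>
      intro h
      simp only [List.head?_cons, Option.some.injEq] at h
      exact ⟨xs, by rw [h]; rfl⟩

theorem pvFindSingletonEq (u : List Char) (c : Char) (k : Nat)
    (h1 : u[k]? = some c) (h2 : ∀ m < k, u[m]? ≠ some c) :
    PySem.Chars.find u [c] = (k : Int) := by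
  have hmem : c ∈ u := List.mem_of_getElem? h1
  have hin : [c] <:+: u := by
    obtain ⟨l1, l2, rfl⟩ := List.append_of_mem hmem
    exact ⟨l1, l2, by simp⟩
  have h0 : 0 ≤ PySem.Chars.find u [c] := (PySem.Chars.find_nonneg_iff _ _).mpr hin
  obtain ⟨hpre, hmin⟩ := PySem.Chars.find_spec h0
  have hf : u[(PySem.Chars.find u [c]).toNat]? = some c := by
    have := (pvPrefixSingleton _ _).mp hpre
    rwa [List.head?_drop] at this
  have hk1 : ¬ k < (PySem.Chars.find u [c]).toNat := by
    intro hlt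
    exact hmin k hlt ((pvPrefixSingleton _ _).mpr (by rw [List.head?_drop]; exact h1))
  have hk2 : ¬ (PySem.Chars.find u [c]).toNat < k := fun hlt => h2 _ hlt hf
  omega

theorem pvFindAppend (t r : List Char) (c : Char) (hc : c ∉ t) :
    PySem.Chars.find (t ++ c :: r) [c] = (t.length : Int) := by
  apply pvFindSingletonEq
  · rw [List.getElem?_append_right (le_refl _)]; simp
  · intro m hm
    rw [List.getElem?_append_left hm]
    intro hval
    exact hc (List.mem_of_getElem? hval)

theorem pvSplitFirst (c : Char) : ∀ (s : List Char), c ∈ s →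
    s = s.takeWhile (fun x => decide (x ≠ c)) ++ c :: (s.dropWhile (fun x => decide (x ≠ c))).tail := by
  intro s
  induction s with
  | nil => intro h; cases h
  | cons x xs ih =>
    intro h
    by_cases hx : x = c
    · subst hx
      simp [List.takeWhile_cons, List.dropWhile_cons]
    · have hmem : c ∈ xs := by
        rcases List.mem_cons.mp h with h' | h'
        · exact absurd h'.symm hx
        · exact h'
      simp only [List.takeWhile_cons, List.dropWhile_cons, decide_eq_true_eq]
      rw [if_pos hx, if_pos hx]
      simpa using ih hmem

theorem pvNotMemTakeWhile (c : Char) (s : List Char) :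
    c ∉ s.takeWhile (fun x => decide (x ≠ c)) := by
  intro h
  have := List.mem_takeWhile_imp h
  simp at this

-- reference shape of PySem.Chars.splitOn on a one-char separator, for the rewrite lemmas below
def pvPieces (c : Char) (cur : List Char) (l : List Char) : List (List Char) :=
  (cur.reverse ++ l.takeWhile (fun x => decide (x ≠ c))) ::
    (if h : c ∈ l then pvPieces c [] ((l.dropWhile (fun x => decide (x ≠ c))).tail) else [])
termination_by l.length
decreasing_by
  have hne : l.dropWhile (fun x => decide (x ≠ c)) ≠ [] := by
    intro hnil
    have := List.dropWhile_eq_nil_iff.mp hnil c h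
    simp at this
  have l1 : (l.dropWhile (fun x => decide (x ≠ c))).length ≤ l.length := List.length_dropWhile_le _ _
  have l2 : 0 < (l.dropWhile (fun x => decide (x ≠ c))).length := List.length_pos_iff.mpr hne
  simp only [List.length_tail]
  omega

theorem pvGoEq (c : Char) : ∀ (fuel : Nat) (l cur : List Char) (acc : List (List Char)),
    l.length < fuel →
    PySem.Chars.splitOn.go [c] fuel l cur acc = acc.reverse ++ pvPieces c cur l := by
  intro fuel
  induction fuel with
  | zero => intro l cur acc h; omega
  | succ fuel ih =>
    intro l cur acc h
    cases l with
    | nil =>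
      rw [PySem.Chars.splitOn.go, pvPieces]
      simp
      omega
    | cons x xs =>
      rw [PySem.Chars.splitOn.go]
      by_cases hx : x = c
      · subst hx
        rw [if_pos (by simp [List.isPrefixOf])]
        simp only [List.length_cons, List.length_nil, Nat.zero_add, List.drop_succ_cons,
          List.drop_zero]
        rw [ih _ _ _ (by simp at h ⊢; omega)]
        conv_rhs => rw [pvPieces]
        rw [dif_pos List.mem_cons_self]
        simp [List.takeWhile_cons, List.dropWhile_cons]
      · rw [if_neg (by simp [List.isPrefixOf]; exact fun h' => hx h'.symm)]
        rw [ih _ _ _ (by simp at h ⊢; omega)]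
        congr 1
        conv_lhs => rw [pvPieces]
        conv_rhs => rw [pvPieces]
        simp only [List.takeWhile_cons, List.dropWhile_cons, decide_eq_true_eq]
        rw [if_pos hx, if_pos hx]
        by_cases hm : c ∈ xs
        · rw [dif_pos hm, dif_pos (List.mem_cons_of_mem _ hm)]
          simp
        · rw [dif_neg hm, dif_neg (by
            intro hmm
            rcases List.mem_cons.mp hmm with h' | h'
            · exact hx h'.symm
            · exact hm h')]
          simp

theorem pvSplitOnChar (c : Char) (s : List Char) :
    PySem.Chars.splitOn s [c] = pvPieces c [] s := by
  unfold PySem.Chars.splitOn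
  rw [pvGoEq c (s.length + 1) s [] [] (by omega)]
  simp

theorem pvTakeWhileAll (p : Char → Bool) : ∀ (s : List Char), (∀ x ∈ s, p x = true) →
    s.takeWhile p = s := by
  intro s
  induction s with
  | nil => intro; rfl
  | cons x xs ih =>
    intro h
    rw [List.takeWhile_cons, if_pos (h x List.mem_cons_self)]
    rw [ih (fun y hy => h y (List.mem_cons_of_mem x hy))]

theorem pvSplitOnNeg (c : Char) (s : List Char) (h : c ∉ s) :
    PySem.Chars.splitOn s [c] = [s] := by
  rw [pvSplitOnChar, pvPieces, dif_neg h]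
  rw [pvTakeWhileAll _ s (fun x hx => by
    simp only [decide_eq_true_eq]
    intro hxc
    subst hxc
    exact h hx)]
  simp

theorem pvSplitOnPos (c : Char) (s : List Char) (h : c ∈ s) :
    PySem.Chars.splitOn s [c] =
      s.takeWhile (fun x => decide (x ≠ c)) ::
        PySem.Chars.splitOn ((s.dropWhile (fun x => decide (x ≠ c))).tail) [c] := by
  rw [pvSplitOnChar, pvPieces, dif_pos h, pvSplitOnChar]
  simp

theorem pvMemSplitOnExists (c x : Char) (hx : x ≠ c) : ∀ (n : Nat) (l : List Char),
    l.length ≤ n → x ∈ l → ∃ seg ∈ PySem.Chars.splitOn l [c], x ∈ seg := by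
  intro n
  induction n with
  | zero =>
    intro l hl hm
    rw [List.length_eq_zero_iff.mp (Nat.le_zero.mp hl)] at hm
    cases hm
  | succ n ih =>
    intro l hl hm
    by_cases hc : c ∈ l
    · rw [pvSplitOnPos c l hc]
      have hsplit := pvSplitFirst c l hc
      rw [hsplit] at hm
      rcases List.mem_append.mp hm with hm' | hm'
      · exact ⟨_, List.mem_cons_self, hm'⟩
      · rcases List.mem_cons.mp hm' with hm'' | hm''
        · exact absurd hm'' hx
        · have hlen : ((l.dropWhile (fun x => decide (x ≠ c))).tail).length ≤ n := by
            have hne : l.dropWhile (fun x => decide (x ≠ c)) ≠ [] := by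
              intro hnil
              have := List.dropWhile_eq_nil_iff.mp hnil c hc
              simp at this
            have l1 : (l.dropWhile (fun x => decide (x ≠ c))).length ≤ l.length :=
              List.length_dropWhile_le _ _
            have l2 : 0 < (l.dropWhile (fun x => decide (x ≠ c))).length :=
              List.length_pos_iff.mpr hne
            simp only [List.length_tail]
            omega
          obtain ⟨seg, hseg, hxseg⟩ := ih _ hlen hm''
          exact ⟨seg, List.mem_cons_of_mem _ hseg, hxseg⟩
    · rw [pvSplitOnNeg c l hc]
      exact ⟨l, List.mem_cons_self, hm⟩

theorem pvTakeWhileAppendStop (p : Char → Bool) (x : Char) (l2 : List Char) :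
    ∀ (l1 : List Char), (∀ y ∈ l1, p y = true) → p x = false →
      (l1 ++ x :: l2).takeWhile p = l1 ∧ (l1 ++ x :: l2).dropWhile p = x :: l2 := by
  intro l1
  induction l1 with
  | nil =>
    intro _ hx
    simp [List.takeWhile_cons, List.dropWhile_cons, hx]
  | cons y ys ih =>
    intro h hx
    have hy : p y = true := h y List.mem_cons_self
    obtain ⟨ht, hd⟩ := ih (fun z hz => h z (List.mem_cons_of_mem y hz)) hx
    constructor
    · rw [List.cons_append, List.takeWhile_cons, if_pos hy, ht]
    · rw [List.cons_append, List.dropWhile_cons, if_pos hy, hd]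

-- when the first ']' of l comes before its first '[' (and some '[' exists), taking/dropping
-- to the first ']' commutes with first splitting at the first '['
theorem pvTakeWhileComm : ∀ (l : List Char),
    ']' ∈ l.takeWhile (fun x => decide (x ≠ '[')) → '[' ∈ l →
    l.takeWhile (fun x => decide (x ≠ ']')) =
      (l.takeWhile (fun x => decide (x ≠ '['))).takeWhile (fun x => decide (x ≠ ']')) ∧
    (l.dropWhile (fun x => decide (x ≠ ']'))).tail =
      ((l.takeWhile (fun x => decide (x ≠ '['))).dropWhile (fun x => decide (x ≠ ']'))).tail ++
        '[' :: (l.dropWhile (fun x => decide (x ≠ '['))).tail := by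
  intro l
  induction l with
  | nil => intro h _; cases h
  | cons x xs ih =>
    intro hJ hB
    by_cases hxl : x = '['
    · subst hxl
      rw [List.takeWhile_cons] at hJ
      simp at hJ
    · by_cases hxr : x = ']'
      · subst hxr
        have hBxs : '[' ∈ xs := by
          rcases List.mem_cons.mp hB with h' | h'
          · exact absurd h'.symm (by decide)
          · exact h'
        have hsplit := pvSplitFirst '[' xs hBxs
        constructor
        · simp [List.takeWhile_cons, hxl]
        · rw [List.dropWhile_cons]
          simp only [decide_eq_true_eq]
          rw [if_neg (by simp), List.takeWhile_cons, if_pos (by simp [hxl]),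
            List.dropWhile_cons, if_neg (by simp)]
          simpa using hsplit
      · rw [List.takeWhile_cons, if_pos (by simp [hxl])] at hJ
        have hJ' : ']' ∈ xs.takeWhile (fun x => decide (x ≠ '[')) := by
          rcases List.mem_cons.mp hJ with h' | h'
          · exact absurd h'.symm hxr
          · exact h'
        have hB' : '[' ∈ xs := by
          rcases List.mem_cons.mp hB with h' | h'
          · exact absurd h'.symm hxl
          · exact h'
        obtain ⟨ih1, ih2⟩ := ih hJ' hB'
        constructor
        · rw [List.takeWhile_cons, if_pos (by simp [hxr]), List.takeWhile_cons,
            if_pos (by simp [hxl]), List.takeWhile_cons, if_pos (by simp [hxr]), ih1]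
        · rw [List.dropWhile_cons, if_pos (by simp [hxr]), List.takeWhile_cons,
            if_pos (by simp [hxl]), List.dropWhile_cons, if_pos (by simp [hxr]),
            List.dropWhile_cons, if_pos (by simp [hxl]), ih2]

theorem pvSplitOnGoAux (sep : List Char) : ∀ (fuel : Nat) (l cur : List Char)
    (acc : List (List Char)) (p : List Char),
    p ∈ PySem.Chars.splitOn.go sep fuel l cur acc → p ∈ acc ∨ p.Sublist (cur.reverse ++ l) := by
  intro fuel
  induction fuel with
  | zero =>
    intro l cur acc p h
    simp only [PySem.Chars.splitOn.go, List.mem_reverse, List.mem_cons] at h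
    rcases h with h | h
    · right; rw [h]
    · left; exact h
  | succ fuel ih =>
    intro l cur acc p h
    cases l with
    | nil =>
      simp only [PySem.Chars.splitOn.go, List.mem_reverse, List.mem_cons] at h
      rcases h with h | h
      · right; rw [h]; simp
      · left; exact h
    | cons chd ctl =>
      rw [PySem.Chars.splitOn.go] at h
      by_cases hsp : sep.isPrefixOf (chd :: ctl) = true
      · rw [if_pos hsp] at h
        rcases ih _ _ _ _ h with h' | h'
        · rcases List.mem_cons.mp h' with h'' | h''
          · right; rw [h'']; exact List.sublist_append_left _ _
          · left; exact h''
        · right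
          simp only [List.reverse_nil, List.nil_append] at h'
          exact h'.trans ((List.drop_sublist _ _).trans (List.sublist_append_right _ _))
      · rw [if_neg hsp] at h
        rcases ih _ _ _ _ h with h' | h'
        · left; exact h'
        · right; simpa [List.append_assoc] using h'

theorem pvMemSplitOnSublist (p s sep : List Char) (h : p ∈ PySem.Chars.splitOn s sep) :
    p.Sublist s := by
  unfold PySem.Chars.splitOn at h
  rcases pvSplitOnGoAux sep (s.length + 1) s [] [] p h with h' | h'
  · simp at h'
  · simpa using h'

theorem pvMemStrip (c : Char) (p : List Char) (h : c ∈ PySem.Chars.strip p) : c ∈ p := by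
  unfold PySem.Chars.strip PySem.Chars.rstrip PySem.Chars.lstrip at h
  rw [List.mem_reverse] at h
  have h1 := (List.dropWhile_sublist _).subset h
  rw [List.mem_reverse] at h1
  exact (List.dropWhile_sublist _).subset h1

theorem pvDigitCharOK (m : Nat) : Nat.digitChar m ≠ '[' ∧ Nat.digitChar m ≠ ']' := by
  rcases Nat.lt_or_ge m 16 with h | h
  · interval_cases m <;> exact ⟨by decide, by decide⟩
  · have hstar : Nat.digitChar m = '*' := by
      unfold Nat.digitChar
      repeat rw [if_neg (by omega)]
    rw [hstar]; exact ⟨by decide, by decide⟩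

theorem pvToDigitsCoreAux (b : Nat) : ∀ (fuel n : Nat) (ds : List Char),
    (∀ x ∈ ds, x ≠ '[' ∧ x ≠ ']') → ∀ c ∈ Nat.toDigitsCore b fuel n ds, c ≠ '[' ∧ c ≠ ']' := by
  intro fuel
  induction fuel with
  | zero =>
    intro n ds hds c hc
    simp only [Nat.toDigitsCore] at hc
    exact hds c hc
  | succ fuel ih =>
    intro n ds hds c hc
    simp only [Nat.toDigitsCore] at hc
    have hds' : ∀ x ∈ (Nat.digitChar (n % b) :: ds), x ≠ '[' ∧ x ≠ ']' := by
      intro x hx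
      rcases List.mem_cons.mp hx with h | h
      · rw [h]; exact pvDigitCharOK _
      · exact hds x h
    by_cases hnb : n / b = 0
    · rw [if_pos hnb] at hc; exact hds' c hc
    · rw [if_neg hnb] at hc; exact ih _ _ hds' c hc

theorem pvToCharsNoBracket (v : Int) (c : Char) (h : c ∈ PySem.Int.toChars v) :
    c ≠ '[' ∧ c ≠ ']' := by
  unfold PySem.Int.toChars at h
  by_cases hv : v < 0
  · rw [if_pos hv] at h
    rcases List.mem_cons.mp h with h' | h'
    · rw [h']; exact ⟨by decide, by decide⟩
    · unfold Nat.toDigits at h'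
      exact pvToDigitsCoreAux 10 _ _ _ (by simp) c h'
  · rw [if_neg hv] at h
    unfold Nat.toDigits at h
    exact pvToDigitsCoreAux 10 _ _ _ (by simp) c h

theorem pvFoldShape {α β γ : Type} (l : List α) (P : α → Bool) (r : α → List γ)
    (f : α → γ → List β) (g : α → List β) (acc : List β) :
    l.foldl (fun acc x => if P x then (r x).foldl (fun acc y => acc ++ f x y) acc else acc ++ g x) acc
      = acc ++ l.flatMap (fun x => if P x then (r x).flatMap (f x) else g x) := by
  induction l generalizing acc with
  | nil => simp
  | cons x xs ih =>
    simp only [List.foldl_cons, List.flatMap_cons]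
    cases hP : P x with
    | true =>
      rw [if_pos rfl, if_pos rfl, PySem.List.foldl_append_eq_flatMap, ih, List.append_assoc]
    | false =>
      rw [if_neg (by simp), if_neg (by simp), ih, List.append_assoc]

theorem pvFlatMapCongr {α β : Type} (l : List α) (f g : α → List β) (h : ∀ x ∈ l, f x = g x) :
    l.flatMap f = l.flatMap g := by
  simp only [List.flatMap_def]
  exact congrArg List.flatten (List.map_congr_left h)

theorem pvFlatMapAssoc {α β γ : Type} (l : List α) (f : α → List β) (g : β → List γ) :
    (l.flatMap f).flatMap g = l.flatMap (fun x => (f x).flatMap g) := by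
  induction l with
  | nil => simp
  | cons x xs ih => simp [ih]

theorem pvSlices (a b c' : List Char) :
    PySem.Chars.slice (a ++ '[' :: (b ++ ']' :: c')) (some 0) (some (a.length : Int)) = a ∧
    PySem.Chars.slice (a ++ '[' :: (b ++ ']' :: c')) none (some (a.length : Int)) = a ∧
    PySem.Chars.slice (a ++ '[' :: (b ++ ']' :: c')) (some ((a.length : Int) + 1))
      (some ((a.length + 1 + b.length : Nat) : Int)) = b ∧
    PySem.Chars.slice (a ++ '[' :: (b ++ ']' :: c'))
      (some (((a.length + 1 + b.length : Nat) : Int) + 1)) none = c' := by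
  refine ⟨?_, ?_, ?_, ?_⟩
  · rw [PySem.Chars.slice_eq_listSlice, PySem.List.slice_zero_start,
      PySem.List.slice_to _ (by positivity)]
    simp
  · rw [PySem.Chars.slice_eq_listSlice, PySem.List.slice_to _ (by positivity)]
    simp
  · have h1 : ((a.length : Int) + 1) = ((a.length + 1 : Nat) : Int) := by push_cast; ring
    rw [PySem.Chars.slice_eq_listSlice, h1, PySem.List.slice_natCast]
    have h2 : a.length + 1 + b.length - (a.length + 1) = b.length := by omega
    rw [h2]
    have h3 : a ++ '[' :: (b ++ ']' :: c') = (a ++ ['[']) ++ (b ++ ']' :: c') := by simp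
    rw [h3]
    have h4 : a.length + 1 = (a ++ ['[']).length := by simp
    rw [h4, List.drop_left, List.take_left]
  · have h1 : (((a.length + 1 + b.length : Nat) : Int) + 1) = ((a.length + 1 + b.length + 1 : Nat) : Int) := by
      push_cast; ring
    rw [PySem.Chars.slice_eq_listSlice, h1, PySem.List.slice_from _ (by positivity)]
    have h3 : a ++ '[' :: (b ++ ']' :: c') = (a ++ '[' :: (b ++ [']'])) ++ c' := by simp
    rw [h3]
    have h4 : ((a.length + 1 + b.length + 1 : Nat) : Int).toNat = (a ++ '[' :: (b ++ [']'])).length := by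
      simp; omega
    rw [h4, List.drop_left]

theorem pvFindsOf (A b c' : List Char) (h1 : '[' ∉ A) (h2 : ']' ∉ A) (h3 : ']' ∉ b) :
    PySem.Chars.find (A ++ '[' :: (b ++ ']' :: c')) ['['] = (A.length : Int) ∧
    PySem.Chars.find (A ++ '[' :: (b ++ ']' :: c')) [']'] = ((A.length + 1 + b.length : Nat) : Int) := by
  constructor
  · exact pvFindAppend A _ '[' h1
  · have h : A ++ '[' :: (b ++ ']' :: c') = (A ++ '[' :: b) ++ ']' :: c' := by simp
    rw [h, pvFindAppend _ _ ']' (by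
      intro hm
      rcases List.mem_append.mp hm with hm | hm
      · exact h2 hm
      · rcases List.mem_cons.mp hm with hm | hm
        · exact absurd hm (by decide)
        · exact h3 hm)]
    simp only [List.length_append, List.length_cons]
    push_cast
    ring

-- MAIN: A's recursion, run under any bracket-free prefix t, equals B's product fold
theorem pvMain (fuel : Nat) : ∀ (t s : List Char), '[' ∉ t → ']' ∉ t →
    pvWf s = true → s.count ']' < fuel →
    pyA fuel (t ++ s) = (pvExpand s).map (fun r => t ++ r) := by
  induction fuel with
  | zero => intro t s _ _ _ hcount; omega
  | succ fuel ih =>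
    intro t s htL htR hwf hcount
    by_cases hpair : PySem.Chars.isIn ['['] s = true ∧ PySem.Chars.isIn [']'] s = true
    case neg =>
      have hcond : (PySem.Chars.isIn ['['] s && PySem.Chars.isIn [']'] s) = false := by
        cases hA : PySem.Chars.isIn ['['] s with
        | false => simp
        | true =>
          cases hB : PySem.Chars.isIn [']'] s with
          | false => simp
          | true => exact absurd ⟨hA, hB⟩ hpair
      have hcondT : (PySem.Chars.isIn ['['] (t ++ s) && PySem.Chars.isIn [']'] (t ++ s)) = false := by
        rw [pvIsInAppend _ _ _ htL, pvIsInAppend _ _ _ htR]; exact hcond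
      have hparse : parseB s = ([], s) := by rw [parseB]; rw [dif_neg (by simp [hcond])]
      simp only [pyA, hcondT, Bool.false_eq_true, if_false]
      simp [pvExpand, hparse]
    case pos =>
      obtain ⟨h1, h2⟩ := hpair
      have hmemL : '[' ∈ s := (pvIsInSingleton _ _).mp h1
      have hmemR : ']' ∈ s := (pvIsInSingleton _ _).mp h2
      have hs := pvSplitFirst '[' s hmemL
      have haL := pvNotMemTakeWhile '[' s
      set a := s.takeWhile (fun x => decide (x ≠ '[')) with hadef
      set t0 := (s.dropWhile (fun x => decide (x ≠ '['))).tail with htdef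
      have hwfc : pvWfChain a (PySem.Chars.splitOn t0 ['[']) = true := by
        rw [← hwf]
        unfold pvWf
        rw [pvSplitOnPos '[' s hmemL]
      obtain ⟨haR, hmemRt, hbL, hwfs⟩ :
          (']' ∉ a) ∧ (']' ∈ t0) ∧ ('[' ∉ t0.takeWhile (fun x => decide (x ≠ ']'))) ∧
          pvWf ((t0.dropWhile (fun x => decide (x ≠ ']'))).tail) = true := by
        by_cases hbrk : '[' ∈ t0
        · -- another bracket follows: the first segment of t0 must close this one
          have htu := pvSplitFirst '[' t0 hbrk
          have hu1L := pvNotMemTakeWhile '[' t0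
          rw [pvSplitOnPos '[' t0 hbrk] at hwfc
          rw [pvWfChain] at hwfc
          cases hcnd : (decide (']' ∉ a) && decide (']' ∈ t0.takeWhile (fun x => decide (x ≠ '[')))) with
          | false =>
            exfalso
            rw [hcnd, if_neg (by simp)] at hwfc
            simp only [List.all_cons, Bool.and_eq_true, List.all_eq_true, decide_eq_true_eq] at hwfc
            obtain ⟨hfa, hfu1, hfsegs⟩ := hwfc
            have hnt0 : ']' ∉ t0 := by
              intro hmem
              rw [htu] at hmem
              rcases List.mem_append.mp hmem with hm | hm
              · exact absurd rfl (hfu1 ']' hm)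
              · rcases List.mem_cons.mp hm with hm | hm
                · exact absurd hm (by decide)
                · obtain ⟨seg, hseg, hxseg⟩ :=
                    pvMemSplitOnExists '[' ']' (by decide) _ _ (le_refl _) hm
                  exact absurd rfl (hfsegs seg hseg ']' hxseg)
            rw [hs] at hmemR
            rcases List.mem_append.mp hmemR with hm | hm
            · exact absurd rfl (hfa ']' hm)
            · rcases List.mem_cons.mp hm with hm | hm
              · exact absurd hm (by decide)
              · exact hnt0 hm
          | true =>
            rw [hcnd, if_pos rfl, Bool.and_eq_true] at hwfc
            simp only [Bool.and_eq_true, decide_eq_true_eq] at hcnd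
            obtain ⟨hja, hju⟩ := hcnd
            have hJt : ']' ∈ t0 := (List.takeWhile_sublist _).subset hju
            obtain ⟨hcomm1, hcomm2⟩ := pvTakeWhileComm t0 hju hbrk
            refine ⟨hja, hJt, ?_, ?_⟩
            · rw [hcomm1]
              intro hmem
              exact hu1L ((List.takeWhile_sublist _).subset hmem)
            · have hfree : '[' ∉ ((t0.takeWhile (fun x => decide (x ≠ '['))).dropWhile
                  (fun x => decide (x ≠ ']'))).tail := by
                intro hmem
                exact hu1L ((List.dropWhile_sublist _).subset ((List.tail_sublist _).subset hmem))
              unfold pvWf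
              rw [hcomm2, pvSplitOnPos '[' _ (by simp)]
              obtain ⟨hT, hD⟩ := pvTakeWhileAppendStop (fun x => decide (x ≠ '[')) '[' _ _
                (fun y hy => by
                  simp only [decide_eq_true_eq]
                  intro hc
                  subst hc
                  exact hfree hy) (by simp)
              rw [hT, hD]
              simpa using hwfc.2
        · -- no further '[': the single remaining segment must close this bracket
          rw [pvSplitOnNeg '[' t0 hbrk] at hwfc
          rw [pvWfChain] at hwfc
          cases hcnd : (decide (']' ∉ a) && decide (']' ∈ t0)) with
          | false =>
            exfalso
            rw [hcnd, if_neg (by simp)] at hwfc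
            simp only [List.all_cons, Bool.and_eq_true, List.all_eq_true, decide_eq_true_eq] at hwfc
            obtain ⟨hfa, hft0, _⟩ := hwfc
            rw [hs] at hmemR
            rcases List.mem_append.mp hmemR with hm | hm
            · exact absurd rfl (hfa ']' hm)
            · rcases List.mem_cons.mp hm with hm | hm
              · exact absurd hm (by decide)
              · exact absurd rfl (hft0 ']' hm)
          | true =>
            simp only [Bool.and_eq_true, decide_eq_true_eq] at hcnd
            obtain ⟨hja, hjt⟩ := hcnd
            refine ⟨hja, hjt, ?_, ?_⟩
            · intro hmem
              exact hbrk ((List.takeWhile_sublist _).subset hmem)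
            · have hfree : '[' ∉ (t0.dropWhile (fun x => decide (x ≠ ']'))).tail := by
                intro hmem
                exact hbrk ((List.dropWhile_sublist _).subset ((List.tail_sublist _).subset hmem))
              unfold pvWf
              rw [pvSplitOnNeg '[' _ hfree]
              rfl
      have hts := pvSplitFirst ']' t0 hmemRt
      have hbR := pvNotMemTakeWhile ']' t0
      set b := t0.takeWhile (fun x => decide (x ≠ ']')) with hbdef
      set c' := (t0.dropWhile (fun x => decide (x ≠ ']'))).tail with hcdef
      have hsfull : s = a ++ '[' :: (b ++ ']' :: c') := by rw [hs, hts]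
      rw [hsfull]
      rw [hsfull] at hcount
      obtain ⟨hfindL, hfindR⟩ := pvFindsOf a b c' haL haR hbR
      obtain ⟨hsl0, hslN, hslB, hslS⟩ := pvSlices a b c'
      have hcount' : c'.count ']' < fuel := by
        have hZa : a.count ']' = 0 := List.count_eq_zero.mpr haR
        have hZb : b.count ']' = 0 := List.count_eq_zero.mpr hbR
        simp [List.count_append, hZa, hZb] at hcount
        omega
      -- the A side works on (t ++ a) ++ '[' :: (b ++ ']' :: c')
      have hassoc : t ++ (a ++ '[' :: (b ++ ']' :: c')) = (t ++ a) ++ '[' :: (b ++ ']' :: c') := by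
        simp
      have htaL : '[' ∉ t ++ a := by simp [List.mem_append, htL, haL]
      have htaR : ']' ∉ t ++ a := by simp [List.mem_append, htR, haR]
      obtain ⟨hFL, hFR⟩ := pvFindsOf (t ++ a) b c' htaL htaR hbR
      obtain ⟨hsl0', hslN', hslB', hslS'⟩ := pvSlices (t ++ a) b c'
      have hcondT : (PySem.Chars.isIn ['['] ((t ++ a) ++ '[' :: (b ++ ']' :: c')) &&
          PySem.Chars.isIn [']'] ((t ++ a) ++ '[' :: (b ++ ']' :: c'))) = true := by
        rw [Bool.and_eq_true]
        exact ⟨(pvIsInSingleton _ _).mpr (by simp), (pvIsInSingleton _ _).mpr (by simp)⟩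
      rw [hassoc]
      simp only [pyA]
      rw [if_pos hcondT]
      simp only [hFL, hFR, hsl0', hslB', hslS']
      rw [pvFoldShape]
      simp only [List.nil_append]
      -- the B side: one parse step
      have hparse : parseB (a ++ '[' :: (b ++ ']' :: c')) =
          ((a, (PySem.Chars.splitOn b [',']).foldl
            (fun opts part =>
              if PySem.Chars.isIn ['-'] (PySem.Chars.strip part) then
                (PySem.List.pyRange
                    ((PySem.Int.ofChars? ((PySem.List.pyGet? (PySem.Chars.splitOn (PySem.Chars.strip part) ['-']) 0).getD [])).getD 0)
                    ((PySem.Int.ofChars? ((PySem.List.pyGet? (PySem.Chars.splitOn (PySem.Chars.strip part) ['-']) 1).getD [])).getD 0 + 1)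
                    1).foldl (fun opts v => opts ++ [PySem.Int.toChars v]) opts
              else opts ++ [PySem.Chars.strip part]) []) :: (parseB c').1, (parseB c').2) := by
        rw [parseB]
        rw [dif_pos (show (PySem.Chars.isIn ['['] (a ++ '[' :: (b ++ ']' :: c')) &&
            PySem.Chars.isIn [']'] (a ++ '[' :: (b ++ ']' :: c'))) = true by
          rw [Bool.and_eq_true]
          exact ⟨(pvIsInSingleton _ _).mpr (by simp), (pvIsInSingleton _ _).mpr (by simp)⟩)]
        simp only [hfindL, hfindR, hslN, hslB, hslS]
      have hexp : pvExpand (a ++ '[' :: (b ++ ']' :: c')) =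
          ((PySem.Chars.splitOn b [',']).flatMap (fun part =>
            if PySem.Chars.isIn ['-'] (PySem.Chars.strip part) then
              (PySem.List.pyRange
                  ((PySem.Int.ofChars? ((PySem.List.pyGet? (PySem.Chars.splitOn (PySem.Chars.strip part) ['-']) 0).getD [])).getD 0)
                  ((PySem.Int.ofChars? ((PySem.List.pyGet? (PySem.Chars.splitOn (PySem.Chars.strip part) ['-']) 1).getD [])).getD 0 + 1)
                  1).flatMap (fun v => [PySem.Int.toChars v])
            else [PySem.Chars.strip part])).flatMap
            (fun o => (pvExpand c').map (fun r => a ++ o ++ r)) := by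
        unfold pvExpand
        rw [hparse]
        simp only [List.reverse_cons, List.foldl_append, List.foldl_cons, List.foldl_nil]
        congr 1
        rw [pvFoldShape]
        simp
      rw [hexp, List.map_flatMap, pvFlatMapAssoc]
      apply pvFlatMapCongr
      intro part hpart
      have hsub : ∀ x ∈ PySem.Chars.strip part, x ∈ b := fun x hx =>
        (pvMemSplitOnSublist part b [','] hpart).subset (pvMemStrip x part hx)
      have hqL : '[' ∉ PySem.Chars.strip part := fun hm => hbL (hsub _ hm)
      have hqR : ']' ∉ PySem.Chars.strip part := fun hm => hbR (hsub _ hm)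
      cases hP : PySem.Chars.isIn ['-'] (PySem.Chars.strip part) with
      | true =>
        rw [if_pos rfl, if_pos rfl, pvFlatMapAssoc]
        apply pvFlatMapCongr
        intro v _
        have hvL : '[' ∉ (t ++ a) ++ PySem.Int.toChars v := by
          intro hm
          rcases List.mem_append.mp hm with hm | hm
          · exact htaL hm
          · exact (pvToCharsNoBracket v _ hm).1 rfl
        have hvR : ']' ∉ (t ++ a) ++ PySem.Int.toChars v := by
          intro hm
          rcases List.mem_append.mp hm with hm | hm
          · exact htaR hm
          · exact (pvToCharsNoBracket v _ hm).2 rfl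
        have hih := ih ((t ++ a) ++ PySem.Int.toChars v) c' hvL hvR hwfs hcount'
        rw [hih]
        simp [List.map_map, Function.comp, List.append_assoc]
      | false =>
        rw [if_neg (by simp), if_neg (by simp)]
        have hihL : '[' ∉ (t ++ a) ++ PySem.Chars.strip part := by
          intro hm; rcases List.mem_append.mp hm with hm | hm
          · exact htaL hm
          · exact hqL hm
        have hihR : ']' ∉ (t ++ a) ++ PySem.Chars.strip part := by
          intro hm; rcases List.mem_append.mp hm with hm | hm
          · exact htaR hm
          · exact hqR hm
        have hih := ih ((t ++ a) ++ PySem.Chars.strip part) c' hihL hihR hwfs hcount'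
        rw [hih]
        simp [List.map_map, Function.comp, List.append_assoc]

-- ===== VERDICT (by name: the statement is the Claim_ definition above) =====
theorem replaceAllRanges_spec : Claim_equal_replaceAllRanges := by
  intro string _ hpre
  unfold Spec_replaceAllRanges replaceAllRanges replaceAllRanges_alt
  have h := pvMain (string.toList.count ']' + 1) [] string.toList (by simp) (by simp) hpre
    (by omega)
  simp only [List.nil_append] at h
  rw [h]
  simp [pvExpand]
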